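-- pv_equiv track=rewrite | github.com/tsukasachandesu/gpt | fle.py | _allocate_pairs
-- ===== SOURCE A (Python) =====
-- def _allocate_pairs(total_pairs: int, ratios: tuple[int, ...]) -> tuple[int, ...]:
--     """Allocate `total_pairs` into N buckets by integer ratios (deterministic)."""
--     rs = [int(r) for r in ratios]
--     if any(r <= 0 for r in rs):
--         raise ValueError(f"ratios must be positive, got {ratios!r}")
--     denom = sum(rs)
--     scaled = [total_pairs * r for r in rs]
--     base = [s // denom for s in scaled]
--     frac = [s % denom for s in scaled]
--     rem = total_pairs - sum(base)
--     order = sorted(range(len(rs)), key=lambda i: (-frac[i], i))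
--     for i in order[:rem]:
--         base[i] += 1
--     return tuple(int(x) for x in base)
-- ===== SOURCE B (Python) =====
-- def _allocate_pairs(total_pairs: int, ratios: tuple[int, ...]) -> tuple[int, ...]:
--     """Allocate `total_pairs` into N buckets by integer ratios (deterministic).
--
--     Largest-remainder selection by rank counting: no sort — for each bucket,
--     count how many buckets beat it (larger remainder, or equal remainder and
--     smaller index); it gets an extra unit iff fewer than `rem` beat it.
--     """
--     rs = [int(r) for r in ratios]
--     if any(r <= 0 for r in rs):
--         raise ValueError(f"ratios must be positive, got {ratios!r}")
--     denom = sum(rs)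
--     base = [(total_pairs * r) // denom for r in rs]
--     frac = [(total_pairs * r) % denom for r in rs]
--     rem = total_pairs - sum(base)
--     n = len(rs)
--     out = []
--     for i in range(n):
--         rank = sum(1 for j in range(n)
--                    if frac[j] > frac[i] or (frac[j] == frac[i] and j < i))
--         out.append(base[i] + (1 if rank < rem else 0))
--     return tuple(out)
-- ===== Notes on version B (the rewrite author's own statement) =====
-- stated objective: alternative
-- what changed: Replaces A's sort of all indices by (-frac, i) plus a mutating top-rem loop with direct rank counting: each bucket counts how many buckets have a strictly larger remainder (or equal remainder and smaller index) and gets +1 iff that count is below rem; no sort, no in-place updates, at the price of quadratic counting.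
-- outside the precondition, e.g. on _allocate_pairs(5, (1, 0, 2)): A raises ValueError, B raises ValueError
import Mathlib
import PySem

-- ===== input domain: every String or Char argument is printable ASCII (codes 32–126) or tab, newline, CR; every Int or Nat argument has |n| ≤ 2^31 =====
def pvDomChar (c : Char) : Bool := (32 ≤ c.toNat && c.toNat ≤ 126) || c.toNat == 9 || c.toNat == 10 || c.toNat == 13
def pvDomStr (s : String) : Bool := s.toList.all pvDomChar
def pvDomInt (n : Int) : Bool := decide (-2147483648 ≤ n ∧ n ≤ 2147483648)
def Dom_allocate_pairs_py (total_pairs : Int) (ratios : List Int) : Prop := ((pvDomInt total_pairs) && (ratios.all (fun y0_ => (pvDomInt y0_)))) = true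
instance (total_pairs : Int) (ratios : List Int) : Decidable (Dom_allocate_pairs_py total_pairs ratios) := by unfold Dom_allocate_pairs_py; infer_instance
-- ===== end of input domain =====

-- B replaces A's index sort by (-frac, i) plus a mutating top-rem loop with direct
-- rank counting (each bucket counts the buckets that beat it); alternative algorithm, same cost.


-- ===== PORT A =====
def allocate_pairs_py (total_pairs : Int) (ratios : List Int) : List Int :=
  let rs := ratios.map (fun r => r)
  -- 'if any(r <= 0 for r in rs): raise ValueError' — excluded by Pre_
  let denom := rs.sum
  let scaled := rs.map (fun r => total_pairs * r)
  let base := scaled.map (fun s => PySem.Int.floordiv s denom)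
  let frac := scaled.map (fun s => PySem.Int.mod s denom)
  let rem := total_pairs - base.sum
  let order := PySem.List.sorted2 (PySem.List.pyRange 0 (rs.length : Int) 1)
      (fun i => -(PySem.List.pyGetD frac i 0)) (fun i => i)
  (PySem.List.slice order none (some rem)).foldl
      (fun b i => PySem.List.pySetD b i (PySem.List.pyGetD b i 0 + 1)) base

-- ===== PORT B =====
def allocate_pairs_py_alt (total_pairs : Int) (ratios : List Int) : List Int :=
  let rs := ratios.map (fun r => r)
  -- same validation 'raise ValueError' — excluded by Pre_
  let denom := rs.sum
  let base := rs.map (fun r => PySem.Int.floordiv (total_pairs * r) denom)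
  let frac := rs.map (fun r => PySem.Int.mod (total_pairs * r) denom)
  let rem := total_pairs - base.sum
  let n := (rs.length : Int)
  (PySem.List.pyRange 0 n 1).map (fun i =>
    PySem.List.pyGetD base i 0 +
      (if ((PySem.List.pyRange 0 n 1).map (fun j =>
            if PySem.List.pyGetD frac j 0 > PySem.List.pyGetD frac i 0 ∨
               (PySem.List.pyGetD frac j 0 = PySem.List.pyGetD frac i 0 ∧ j < i)
            then (1 : Int) else 0)).sum < rem then 1 else 0))

-- ===== PRECONDITION & SPEC =====
-- Pre_ excludes exactly the inputs where A raises ValueError (some ratio ≤ 0); B raises there too.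
def Pre_allocate_pairs_py (total_pairs : Int) (ratios : List Int) : Prop :=
  ∀ r ∈ ratios, 0 < r
instance (total_pairs : Int) (ratios : List Int) : Decidable (Pre_allocate_pairs_py total_pairs ratios) := by unfold Pre_allocate_pairs_py; infer_instance
def pvWitness_allocate_pairs_py : Int × List Int := (7, [1, 2, 2])

def Spec_allocate_pairs_py (total_pairs : Int) (ratios : List Int) (out : List Int) : Prop := out = allocate_pairs_py_alt total_pairs ratios
instance (total_pairs : Int) (ratios : List Int) (out : List Int) : Decidable (Spec_allocate_pairs_py total_pairs ratios out) := by unfold Spec_allocate_pairs_py; infer_instance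

-- ===== CLAIM (what is proved, stated in full; the proofs are below) =====
def Claim_equal_allocate_pairs_py : Prop := ∀ (total_pairs : Int) (ratios : List Int), Dom_allocate_pairs_py total_pairs ratios → Pre_allocate_pairs_py total_pairs ratios → Spec_allocate_pairs_py total_pairs ratios (allocate_pairs_py total_pairs ratios)

-- ===== LEMMAS AND PROOFS =====

-- The Bool strict order sorted2 uses internally for key (-frac[i], i).
def pvSelB (frac : List Int) (a b : Int) : Bool :=
  decide (-(PySem.List.pyGetD frac a 0) < -(PySem.List.pyGetD frac b 0)) ||
    (!decide (-(PySem.List.pyGetD frac b 0) < -(PySem.List.pyGetD frac a 0)) && decide (a < b))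

theorem pvSelB_iff (frac : List Int) (a b : Int) :
    pvSelB frac a b = true ↔
      PySem.List.pyGetD frac b 0 < PySem.List.pyGetD frac a 0 ∨
        (PySem.List.pyGetD frac b 0 ≤ PySem.List.pyGetD frac a 0 ∧ a < b) := by
  simp [pvSelB]

theorem pvSorted2_eq_foldl (frac xs : List Int) :
    PySem.List.sorted2 xs (fun i => -(PySem.List.pyGetD frac i 0)) (fun i => i) false =
      xs.foldl (fun acc x => PySem.List.insertBy (pvSelB frac) x acc) [] := rfl

theorem pvSelB_asymm (frac : List Int) (a b : Int) :
    pvSelB frac a b = true → pvSelB frac b a = true → False := by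
  simp only [pvSelB_iff]; omega

theorem pvSelB_trans (frac : List Int) (a b c : Int) :
    pvSelB frac a b = true → pvSelB frac b c = true → pvSelB frac a c = true := by
  simp only [pvSelB_iff]; omega

theorem pvSelB_total (frac : List Int) (a b : Int) (h : a ≠ b) :
    pvSelB frac a b = true ∨ pvSelB frac b a = true := by
  simp only [pvSelB_iff]; omega

theorem pvPerm_insertBy {α : Type} (before : α → α → Bool) (x : α) :
    ∀ l : List α, (PySem.List.insertBy before x l).Perm (x :: l) := by
  intro l
  induction l with
  | nil => simp [PySem.List.insertBy]
  | cons y ys ih =>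
      by_cases h : before x y = true
      · simp [PySem.List.insertBy, h]
      · simp only [PySem.List.insertBy, h]
        exact (ih.cons y).trans (List.Perm.swap x y ys)

theorem pvPairwise_insertBy {α : Type} (before : α → α → Bool)
    (htrans : ∀ a b c, before a b = true → before b c = true → before a c = true)
    (htot : ∀ a b : α, a ≠ b → before a b = true ∨ before b a = true)
    (x : α) : ∀ l : List α, x ∉ l → l.Pairwise (fun a b => before a b = true) →
      (PySem.List.insertBy before x l).Pairwise (fun a b => before a b = true) := by
  intro l
  induction l with
  | nil => intro _ _; simp [PySem.List.insertBy]
  | cons y ys ih =>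
      intro hx hl
      rw [List.pairwise_cons] at hl
      obtain ⟨hy, hys⟩ := hl
      by_cases h : before x y = true
      · simp only [PySem.List.insertBy, h, if_true]
        refine List.Pairwise.cons ?_ (List.Pairwise.cons hy hys)
        intro z hz
        rcases List.mem_cons.mp hz with hz | hz
        · exact hz ▸ h
        · exact htrans x y z h (hy z hz)
      · simp only [PySem.List.insertBy, h]
        have hx' : x ∉ ys := fun hm => hx (List.mem_cons_of_mem _ hm)
        have hyx : before y x = true := by
          rcases htot y x (fun he => hx (by simp [← he])) with h' | h'
          · exact h'
          · exact absurd h' (by simpa using h)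
        refine List.Pairwise.cons ?_ (ih hx' hys)
        intro z hz
        rcases (PySem.List.mem_insertBy before x z ys).mp hz with hz | hz
        · exact hz ▸ hyx
        · exact hy z hz

theorem pvFoldl_insertBy_pairwise {α : Type} (before : α → α → Bool)
    (htrans : ∀ a b c, before a b = true → before b c = true → before a c = true)
    (htot : ∀ a b : α, a ≠ b → before a b = true ∨ before b a = true) :
    ∀ (xs acc : List α), (acc ++ xs).Nodup →
      acc.Pairwise (fun a b => before a b = true) →
      (xs.foldl (fun a x => PySem.List.insertBy before x a) acc).Pairwise
        (fun a b => before a b = true) := by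
  intro xs
  induction xs with
  | nil => intro acc _ hp; simpa using hp
  | cons x xs ih =>
      intro acc hnd hp
      simp only [List.foldl_cons]
      have hperm : (PySem.List.insertBy before x acc ++ xs).Perm ((x :: acc) ++ xs) :=
        (pvPerm_insertBy before x acc).append_right xs
      have hperm2 : ((x :: acc) ++ xs).Perm (acc ++ x :: xs) := by
        simpa using (List.perm_middle (a := x) (l₁ := acc) (l₂ := xs)).symm
      apply ih
      · exact (hperm.trans hperm2).symm.nodup hnd
      · have hxacc : x ∉ acc := by
          have hd := List.disjoint_of_nodup_append hnd
          intro hmem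
          exact hd hmem (List.mem_cons_self)
        exact pvPairwise_insertBy before htrans htot x acc hxacc hp

theorem pvMem_take_iff_countP {α : Type} [DecidableEq α] (before : α → α → Bool)
    (hasym : ∀ a b, before a b = true → before b a = true → False) :
    ∀ (ord : List α) (t : Nat) (i : α), i ∈ ord →
      ord.Pairwise (fun a b => before a b = true) →
      (i ∈ ord.take t ↔ ord.countP (fun j => before j i) < t) := by
  intro ord
  induction ord with
  | nil => intro t i hi; simp at hi
  | cons a rest ih =>
      intro t i hi hp
      rw [List.pairwise_cons] at hp
      obtain ⟨ha, hrest⟩ := hp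
      by_cases hia : i = a
      · subst hia
        have hii : before i i = false := by
          cases h : before i i
          · rfl
          · exact absurd h (fun h' => hasym i i h' h')
        have hr : List.countP (fun j => before j i) rest = 0 := by
          rw [List.countP_eq_zero]
          intro j hj hji
          exact hasym i j (ha j hj) hji
        have h0 : List.countP (fun j => before j i) (i :: rest) = 0 := by
          rw [List.countP_cons]; simp [hii, hr]
        cases t with
        | zero => simp [h0]
        | succ s => simp [h0, List.take_succ_cons]
      · have hi' : i ∈ rest := by
          rcases List.mem_cons.mp hi with h | h
          · exact absurd h hia
          · exact h
        have hai : before a i = true := ha i hi'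
        have hc : List.countP (fun j => before j i) (a :: rest) =
            List.countP (fun j => before j i) rest + 1 := by
          rw [List.countP_cons]; simp [hai]
        cases t with
        | zero => simp [hc]
        | succ s =>
            rw [List.take_succ_cons, hc]
            simp only [List.mem_cons, hia, false_or]
            rw [ih s i hi' hrest]
            omega

theorem pvSum_mod_eq (d : Int) : ∀ (l : List Int),
    (l.map (fun s => PySem.Int.mod s d)).sum =
      l.sum - d * (l.map (fun s => PySem.Int.floordiv s d)).sum := by
  intro l
  induction l with
  | nil => simp
  | cons s t ih =>
      simp only [List.map_cons, List.sum_cons, ih]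
      have h := PySem.Int.floordiv_mul_add_mod s d
      ring_nf
      ring_nf at h
      linarith

theorem pvFoldl_incr : ∀ (idxs b : List Int), idxs.Nodup →
    (∀ i ∈ idxs, 0 ≤ i ∧ i < (b.length : Int)) →
    (idxs.foldl (fun b i => PySem.List.pySetD b i (PySem.List.pyGetD b i 0 + 1)) b).length = b.length ∧
    ∀ k : Int, 0 ≤ k → k < (b.length : Int) →
      PySem.List.pyGetD (idxs.foldl (fun b i => PySem.List.pySetD b i (PySem.List.pyGetD b i 0 + 1)) b) k 0 =
        PySem.List.pyGetD b k 0 + (if k ∈ idxs then 1 else 0) := by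
  intro idxs
  induction idxs with
  | nil =>
      intro b _ _
      refine ⟨rfl, ?_⟩
      intro k _ _
      simp
  | cons i idxs ih =>
      intro b hnd hbd
      have hib := hbd i (List.mem_cons_self)
      have hlen : (PySem.List.pySetD b i (PySem.List.pyGetD b i 0 + 1)).length = b.length :=
        PySem.List.length_pySetD b i _
      have hset : ∀ k : Int, 0 ≤ k → k < (b.length : Int) →
          PySem.List.pyGetD (PySem.List.pySetD b i (PySem.List.pyGetD b i 0 + 1)) k 0 =
            if k = i then PySem.List.pyGetD b i 0 + 1 else PySem.List.pyGetD b k 0 := by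
        intro k hk0 hk1
        rw [PySem.List.pySetD_of_nonneg b _ hib.1]
        rw [PySem.List.pyGetD_eq_getElem _ _ hk0 (by simp only [List.length_set]; omega)]
        rw [List.getElem_set]
        by_cases hk : k = i
        · subst hk
          simp
        · have hne : i.toNat ≠ k.toNat := by omega
          rw [if_neg hne, if_neg hk, PySem.List.pyGetD_eq_getElem b 0 hk0 hk1]
      obtain ⟨ihlen, ihget⟩ := ih (PySem.List.pySetD b i (PySem.List.pyGetD b i 0 + 1))
        (List.nodup_cons.mp hnd).2
        (by intro j hj; rw [hlen]; exact hbd j (List.mem_cons_of_mem _ hj))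
      refine ⟨by rw [List.foldl_cons, ihlen, hlen], ?_⟩
      intro k hk0 hk1
      rw [List.foldl_cons, ihget k hk0 (by rw [hlen]; exact hk1), hset k hk0 hk1]
      have hni : i ∉ idxs := (List.nodup_cons.mp hnd).1
      by_cases hk : k = i
      · subst hk
        simp [hni]
      · simp [List.mem_cons, hk]

-- ===== VERDICT (by name: the statement is the Claim_ definition above) =====
theorem allocate_pairs_py_spec : Claim_equal_allocate_pairs_py := by
  intro tp rs _hdom hpre
  unfold Spec_allocate_pairs_py allocate_pairs_py allocate_pairs_py_alt
  simp only [List.map_id', List.map_map, Function.comp_def]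
  by_cases hnil : rs = []
  · subst hnil
    simp [PySem.List.pyRange_one_eq_nil (le_refl (0 : Int)), PySem.List.slice,
      PySem.List.sorted2]
  · set denom := rs.sum with hdenom
    set base := rs.map (fun r => PySem.Int.floordiv (tp * r) denom) with hbase
    set frac := rs.map (fun r => PySem.Int.mod (tp * r) denom) with hfrac
    set rem := tp - base.sum with hrem
    set n : Int := (rs.length : Int) with hn
    have hdpos : 0 < denom := List.sum_pos rs hpre hnil
    have h1 := pvSum_mod_eq denom (rs.map (fun r => tp * r))
    simp only [List.map_map, Function.comp_def] at h1
    rw [← hbase, ← hfrac] at h1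
    have h2 : (rs.map (fun r => tp * r)).sum = tp * denom := by
      simpa using List.sum_map_mul_left rs (fun r => r) tp
    have h3 : 0 ≤ frac.sum := by
      apply List.sum_nonneg
      intro x hx
      rw [hfrac] at hx
      obtain ⟨r, _, rfl⟩ := List.mem_map.mp hx
      exact PySem.Int.mod_nonneg _ hdpos
    have hfs : frac.sum = denom * rem := by rw [hrem, h1, h2]; ring
    have hremnn : 0 ≤ rem := by
      by_contra hneg
      push Not at hneg
      have := mul_neg_of_pos_of_neg hdpos hneg
      linarith [hfs, h3]
    set ord := PySem.List.sorted2 (PySem.List.pyRange 0 n 1)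
        (fun i => -(PySem.List.pyGetD frac i 0)) (fun i => i) with hord
    have hperm : ord.Perm (PySem.List.pyRange 0 n 1) := PySem.List.sorted2_perm _ _ _ _
    have hpair : ord.Pairwise (fun a b => pvSelB frac a b = true) := by
      rw [hord, pvSorted2_eq_foldl]
      exact pvFoldl_insertBy_pairwise (pvSelB frac) (pvSelB_trans frac) (pvSelB_total frac)
        (PySem.List.pyRange 0 n 1) [] (by simpa using PySem.List.nodup_pyRange_one 0 n)
        List.Pairwise.nil
    have hndord : ord.Nodup := hperm.symm.nodup (PySem.List.nodup_pyRange_one 0 n)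
    rw [PySem.List.slice_to _ hremnn]
    set sel := ord.take rem.toNat with hsel
    have hselmem : ∀ i ∈ sel, 0 ≤ i ∧ i < n := by
      intro i hi
      have hi2 : i ∈ PySem.List.pyRange 0 n 1 := hperm.mem_iff.mp (List.mem_of_mem_take hi)
      exact PySem.List.mem_pyRange_one.mp hi2
    have hselnd : sel.Nodup := (List.take_sublist _ _).nodup hndord
    have hblen : (base.length : Int) = n := by rw [hbase]; simp [hn]
    obtain ⟨hAlen, hAget⟩ := pvFoldl_incr sel base hselnd
      (by intro i hi; rw [hblen]; exact hselmem i hi)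
    apply List.ext_getElem
    · rw [hAlen, hbase]
      simp [hn, PySem.List.length_pyRange_one]
    · intro k h1k h2k
      have hklen : k < rs.length := by
        rw [hAlen, hbase] at h1k
        simpa using h1k
      have hkn : (k : Int) < n := by rw [hn]; exact_mod_cast hklen
      have hk0 : (0 : Int) ≤ (k : Int) := Int.natCast_nonneg k
      have hkb : (k : Int) < (base.length : Int) := by rw [hblen]; exact hkn
      rw [List.getElem_map, PySem.List.getElem_pyRange_one]
      have hL : (List.foldl (fun b i => PySem.List.pySetD b i (PySem.List.pyGetD b i 0 + 1))
            base sel)[k] =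
          PySem.List.pyGetD (List.foldl (fun b i => PySem.List.pySetD b i
            (PySem.List.pyGetD b i 0 + 1)) base sel) (k : Int) 0 := by
        rw [PySem.List.pyGetD_eq_getElem _ 0 hk0 (by rw [hAlen]; exact hkb)]
        simp
      rw [hL, hAget (k : Int) hk0 hkb]
      have hkmem : (k : Int) ∈ ord :=
        hperm.mem_iff.mpr (PySem.List.mem_pyRange_one.mpr ⟨hk0, hkn⟩)
      have htake := pvMem_take_iff_countP (pvSelB frac) (pvSelB_asymm frac) ord rem.toNat
        (k : Int) hkmem hpair
      have hcount : ord.countP (fun j => pvSelB frac j (k : Int)) =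
          (PySem.List.pyRange 0 n 1).countP (fun j => pvSelB frac j (k : Int)) :=
        hperm.countP_eq _
      have hsum : (List.map (fun j =>
            if PySem.List.pyGetD frac j 0 > PySem.List.pyGetD frac ((0 : Int) + (k : Int)) 0 ∨
               (PySem.List.pyGetD frac j 0 = PySem.List.pyGetD frac ((0 : Int) + (k : Int)) 0 ∧
                 j < (0 : Int) + (k : Int))
            then (1 : Int) else 0) (PySem.List.pyRange 0 n 1)).sum =
          ((PySem.List.pyRange 0 n 1).countP (fun j => pvSelB frac j (k : Int)) : Int) := by
        rw [show (fun j =>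
            if PySem.List.pyGetD frac j 0 > PySem.List.pyGetD frac ((0 : Int) + (k : Int)) 0 ∨
               (PySem.List.pyGetD frac j 0 = PySem.List.pyGetD frac ((0 : Int) + (k : Int)) 0 ∧
                 j < (0 : Int) + (k : Int))
            then (1 : Int) else 0) = (fun j =>
            if (fun j => decide (PySem.List.pyGetD frac j 0 > PySem.List.pyGetD frac ((0 : Int) + (k : Int)) 0 ∨
               (PySem.List.pyGetD frac j 0 = PySem.List.pyGetD frac ((0 : Int) + (k : Int)) 0 ∧
                 j < (0 : Int) + (k : Int)))) j = true then (1 : Int) else 0) from by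
          funext j; simp]
        rw [PySem.List.sum_map_ite_one_zero]
        congr 1
        apply List.countP_congr
        intro j _
        simp only [decide_eq_true_eq, pvSelB_iff, zero_add]
        omega
      have hiff : ((k : Int) ∈ sel) ↔ ((List.map (fun j =>
            if PySem.List.pyGetD frac j 0 > PySem.List.pyGetD frac ((0 : Int) + (k : Int)) 0 ∨
               (PySem.List.pyGetD frac j 0 = PySem.List.pyGetD frac ((0 : Int) + (k : Int)) 0 ∧
                 j < (0 : Int) + (k : Int))
            then (1 : Int) else 0) (PySem.List.pyRange 0 n 1)).sum < rem) := by
        rw [hsel, htake, hcount, hsum]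
        omega
      rw [if_congr hiff rfl rfl]
      simp
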